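-- pv_equiv track=rewrite | github.com/mallempatishekar/DP_Studio | utils/default_checks.py | is_boolean_column
-- ===== SOURCE A (Python) =====
-- def is_boolean_column(col) -> bool:
--     """Detect boolean-like categorical columns."""
--     vals = [str(v).lower() for v in col.get("sample_values", [])]
--
--     boolean_sets = [
--         {"yes", "no"},
--         {"true", "false"},
--         {"y", "n"},
--         {"active", "inactive"},
--         {"0", "1"}
--     ]
--
--     for b in boolean_sets:
--         if set(vals).issubset(b):
--             return True
--
--     return False
-- ===== SOURCE B (Python) =====
-- GROUP = {
--     "yes": 0, "no": 0,
--     "true": 1, "false": 1,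
--     "y": 2, "n": 2,
--     "active": 3, "inactive": 3,
--     "0": 4, "1": 4,
-- }
--
--
-- def is_boolean_column(col) -> bool:
--     """Detect boolean-like categorical columns."""
--     ids = {GROUP.get(str(v).lower(), -1) for v in col.get("sample_values", [])}
--     return len(ids) <= 1 and -1 not in ids
-- ===== Notes on version B (the rewrite author's own statement) =====
-- stated objective: idiomatic
-- what changed: Replaced the loop over five candidate boolean sets with repeated subset tests by a single pass that maps each lowercased value through a precomputed token->group dict and checks that at most one group id occurs and none is the unknown sentinel.
import Mathlib
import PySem

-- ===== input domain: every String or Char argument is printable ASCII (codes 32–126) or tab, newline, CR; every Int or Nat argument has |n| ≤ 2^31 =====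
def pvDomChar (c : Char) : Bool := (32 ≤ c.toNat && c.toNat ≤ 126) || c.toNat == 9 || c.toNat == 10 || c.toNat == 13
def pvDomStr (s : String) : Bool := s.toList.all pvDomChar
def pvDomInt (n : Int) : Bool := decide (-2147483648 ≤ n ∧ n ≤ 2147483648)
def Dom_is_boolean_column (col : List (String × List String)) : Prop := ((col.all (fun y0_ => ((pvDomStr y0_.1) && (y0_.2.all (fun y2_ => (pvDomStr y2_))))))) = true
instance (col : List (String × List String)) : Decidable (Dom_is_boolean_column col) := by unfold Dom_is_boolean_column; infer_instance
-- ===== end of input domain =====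

-- B replaces the loop over five candidate boolean sets (each doing a subset scan) by one pass
-- mapping every lowercased value through a precomputed token->group dict; idiomatic single pass.

-- ===== PORT A =====
-- the literal list 'boolean_sets' of A
def pvBoolSets : List (PySem.Set String) :=
  [PySem.Set.ofList ["yes", "no"], PySem.Set.ofList ["true", "false"],
   PySem.Set.ofList ["y", "n"], PySem.Set.ofList ["active", "inactive"],
   PySem.Set.ofList ["0", "1"]]

-- the 'for b in boolean_sets: if …: return True' loop (early return of a pure test = List.any)
def is_boolean_column (col : List (String × List String)) : Bool :=
  let vals := ((PySem.Dict.mk col).getD "sample_values" []).map (fun v => PySem.Str.lower v)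
  pvBoolSets.any (fun b => PySem.Set.issubset (PySem.Set.ofList vals) b)

-- ===== PORT B =====
-- B's module-level GROUP dict
def pvGroup : PySem.Dict String Int :=
  PySem.Dict.ofList [("yes", 0), ("no", 0), ("true", 1), ("false", 1), ("y", 2),
    ("n", 2), ("active", 3), ("inactive", 3), ("0", 4), ("1", 4)]

def is_boolean_column_alt (col : List (String × List String)) : Bool :=
  let ids : PySem.Set Int := PySem.Set.ofList
    (((PySem.Dict.mk col).getD "sample_values" []).map
      (fun v => pvGroup.getD (PySem.Str.lower v) (-1)))
  decide (PySem.Set.len ids ≤ 1) && !(PySem.Set.contains ids (-1))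

-- ===== PRECONDITION & SPEC =====
def Spec_is_boolean_column (col : List (String × List String)) (out : Bool) : Prop := out = is_boolean_column_alt col
instance (col : List (String × List String)) (out : Bool) : Decidable (Spec_is_boolean_column col out) := by unfold Spec_is_boolean_column; infer_instance

-- ===== CLAIM (what is proved, stated in full; the proofs are below) =====
def Claim_equal_is_boolean_column : Prop := ∀ (col : List (String × List String)), Dom_is_boolean_column col → Spec_is_boolean_column col (is_boolean_column col)

-- ===== LEMMAS AND PROOFS =====

-- the group map classified: the five token pairs are exactly the preimages of 0..4, all else is -1
theorem pvGroup_spec (v : String) :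
    pvGroup.getD v (-1) =
      (if v = "yes" ∨ v = "no" then 0 else if v = "true" ∨ v = "false" then 1
       else if v = "y" ∨ v = "n" then 2 else if v = "active" ∨ v = "inactive" then 3
       else if v = "0" ∨ v = "1" then 4 else -1) := by
  simp only [pvGroup, PySem.Dict.ofList, PySem.Dict.update, List.foldl,
    PySem.Dict.getD_insert, PySem.Dict.getD_empty]
  split_ifs <;> simp_all

theorem pvGroup_total (v : String) :
    pvGroup.getD v (-1) = -1 ∨ pvGroup.getD v (-1) = 0 ∨ pvGroup.getD v (-1) = 1 ∨
    pvGroup.getD v (-1) = 2 ∨ pvGroup.getD v (-1) = 3 ∨ pvGroup.getD v (-1) = 4 := by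
  rw [pvGroup_spec]; split_ifs <;> simp

theorem pvGroup_eq_zero (v : String) : pvGroup.getD v (-1) = 0 ↔ (v = "yes" ∨ v = "no") := by
  constructor
  · intro h; rw [pvGroup_spec] at h; split_ifs at h <;> simp_all
  · rintro (rfl | rfl) <;> decide

theorem pvGroup_eq_one (v : String) : pvGroup.getD v (-1) = 1 ↔ (v = "true" ∨ v = "false") := by
  constructor
  · intro h; rw [pvGroup_spec] at h; split_ifs at h <;> simp_all
  · rintro (rfl | rfl) <;> decide

theorem pvGroup_eq_two (v : String) : pvGroup.getD v (-1) = 2 ↔ (v = "y" ∨ v = "n") := by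
  constructor
  · intro h; rw [pvGroup_spec] at h; split_ifs at h <;> simp_all
  · rintro (rfl | rfl) <;> decide

theorem pvGroup_eq_three (v : String) : pvGroup.getD v (-1) = 3 ↔ (v = "active" ∨ v = "inactive") := by
  constructor
  · intro h; rw [pvGroup_spec] at h; split_ifs at h <;> simp_all
  · rintro (rfl | rfl) <;> decide

theorem pvGroup_eq_four (v : String) : pvGroup.getD v (-1) = 4 ↔ (v = "0" ∨ v = "1") := by
  constructor
  · intro h; rw [pvGroup_spec] at h; split_ifs at h <;> simp_all
  · rintro (rfl | rfl) <;> decide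

-- set(xs) has at most one element iff all elements of xs coincide
theorem setlen_le_one (xs : List Int) :
    (PySem.Set.ofList xs).length ≤ 1 ↔ ∀ a ∈ xs, ∀ b ∈ xs, a = b := by
  induction xs with
  | nil => simp [PySem.Set.ofList_nil]
  | cons x t ih =>
    rw [PySem.Set.ofList_cons]
    have hd : (PySem.Set.discard (PySem.Set.ofList t) x) = [] ↔ ∀ y ∈ t, y = x := by
      rw [List.eq_nil_iff_forall_not_mem]
      constructor
      · intro h y hy
        by_contra hne
        exact h y ((PySem.Set.mem_discard _ _ _).mpr ⟨(PySem.Set.mem_ofList _ _).mpr hy, hne⟩)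
      · intro h y hy
        obtain ⟨hy1, hy2⟩ := (PySem.Set.mem_discard _ _ _).mp hy
        exact hy2 (h y ((PySem.Set.mem_ofList _ _).mp hy1))
    constructor
    · intro h a ha b hb
      have hnil : (PySem.Set.discard (PySem.Set.ofList t) x) = [] := by
        cases e : (PySem.Set.discard (PySem.Set.ofList t) x) with
        | nil => rfl
        | cons z w => rw [e] at h; simp at h
      have hx := hd.mp hnil
      rcases List.mem_cons.mp ha with rfl | ha' <;> rcases List.mem_cons.mp hb with rfl | hb'
      · rfl
      · exact (hx b hb').symm
      · exact hx a ha'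
      · rw [hx a ha', hx b hb']
    · intro h
      have hnil : (PySem.Set.discard (PySem.Set.ofList t) x) = [] :=
        hd.mpr (fun y hy => h y (List.mem_cons_of_mem x hy) x (List.mem_cons_self))
      simp [hnil]

-- if every value maps to the same group i ≠ -1, B's two conditions hold
theorem pvAllGroup (vs : List String) (i : Int)
    (h : ∀ x ∈ vs, pvGroup.getD x (-1) = i) (hi : i ≠ -1) :
    (∀ a ∈ vs.map (fun v => pvGroup.getD v (-1)), ∀ b ∈ vs.map (fun v => pvGroup.getD v (-1)), a = b)
      ∧ (-1 : Int) ∉ vs.map (fun v => pvGroup.getD v (-1)) := by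
  constructor
  · intro a ha b hb
    obtain ⟨x, hx, rfl⟩ := List.mem_map.mp ha
    obtain ⟨y, hy, rfl⟩ := List.mem_map.mp hb
    rw [h x hx, h y hy]
  · intro hm
    obtain ⟨x, hx, he⟩ := List.mem_map.mp hm
    exact hi ((h x hx).symm.trans he)

-- the core equivalence, over the (already lowercased) value list
theorem pvCore (vs : List String) :
    pvBoolSets.any (fun b => PySem.Set.issubset (PySem.Set.ofList vs) b)
      = (decide (PySem.Set.len (PySem.Set.ofList (vs.map (fun v => pvGroup.getD v (-1)))) ≤ 1)
         && !(PySem.Set.contains (PySem.Set.ofList (vs.map (fun v => pvGroup.getD v (-1)))) (-1))) := by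
  rw [Bool.eq_iff_iff]
  have hmem : ∀ (x : Int) (ys : List Int), x ∈ PySem.Set.ofList ys ↔ x ∈ ys :=
    fun x ys => PySem.Set.mem_ofList _ _
  constructor
  · intro h
    simp only [pvBoolSets, List.any_cons, List.any_nil, Bool.or_eq_true, Bool.or_false] at h
    have hsub : ∀ (b : PySem.Set String), PySem.Set.issubset (PySem.Set.ofList vs) b = true →
        ∀ x ∈ vs, x ∈ b := by
      intro b hb x hx
      exact (PySem.Set.issubset_iff _ _).mp hb x ((PySem.Set.mem_ofList _ _).mpr hx)
    have key : (∀ a ∈ vs.map (fun v => pvGroup.getD v (-1)),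
          ∀ b ∈ vs.map (fun v => pvGroup.getD v (-1)), a = b)
        ∧ (-1 : Int) ∉ vs.map (fun v => pvGroup.getD v (-1)) := by
      rcases h with h | h | h | h | h
      · refine pvAllGroup vs 0 (fun x hx => ?_) (by decide)
        have := hsub _ h x hx
        rw [pvGroup_eq_zero]
        simpa [PySem.Set.ofList] using this
      · refine pvAllGroup vs 1 (fun x hx => ?_) (by decide)
        have := hsub _ h x hx
        rw [pvGroup_eq_one]
        simpa [PySem.Set.ofList] using this
      · refine pvAllGroup vs 2 (fun x hx => ?_) (by decide)
        have := hsub _ h x hx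
        rw [pvGroup_eq_two]
        simpa [PySem.Set.ofList] using this
      · refine pvAllGroup vs 3 (fun x hx => ?_) (by decide)
        have := hsub _ h x hx
        rw [pvGroup_eq_three]
        simpa [PySem.Set.ofList] using this
      · refine pvAllGroup vs 4 (fun x hx => ?_) (by decide)
        have := hsub _ h x hx
        rw [pvGroup_eq_four]
        simpa [PySem.Set.ofList] using this
    rw [Bool.and_eq_true, decide_eq_true_eq, Bool.not_eq_true']
    refine ⟨?_, ?_⟩
    · have := (setlen_le_one _).mpr key.1
      simp only [PySem.Set.len]
      exact_mod_cast this
    · rw [← Bool.not_eq_true, ← ne_eq] at *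
      intro hc
      exact key.2 ((PySem.Set.mem_ofList _ _).mp ((PySem.Set.contains_iff _ _).mp (by simpa using hc)))
  · intro h
    rw [Bool.and_eq_true, decide_eq_true_eq, Bool.not_eq_true'] at h
    obtain ⟨hlen, hnc⟩ := h
    have hall : ∀ a ∈ vs.map (fun v => pvGroup.getD v (-1)),
        ∀ b ∈ vs.map (fun v => pvGroup.getD v (-1)), a = b := by
      apply (setlen_le_one _).mp
      simp only [PySem.Set.len] at hlen
      exact_mod_cast hlen
    have hnone : (-1 : Int) ∉ vs.map (fun v => pvGroup.getD v (-1)) := by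
      intro hm
      have : PySem.Set.contains (PySem.Set.ofList (vs.map (fun v => pvGroup.getD v (-1)))) (-1) = true :=
        (PySem.Set.contains_iff _ _).mpr ((PySem.Set.mem_ofList _ _).mpr hm)
      rw [hnc] at this; exact Bool.false_ne_true this
    cases vs with
    | nil =>
      simp [pvBoolSets, PySem.Set.issubset_iff, PySem.Set.ofList_nil]
    | cons v rest =>
      have hv0 : ∀ x ∈ v :: rest, pvGroup.getD x (-1) = pvGroup.getD v (-1) := by
        intro x hx
        exact hall _ (List.mem_map_of_mem hx) _ (List.mem_map_of_mem (List.mem_cons_self))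
      have hsubset : ∀ (b : PySem.Set String), (∀ x ∈ v :: rest, x ∈ b) →
          PySem.Set.issubset (PySem.Set.ofList (v :: rest)) b = true := by
        intro b hb
        exact (PySem.Set.issubset_iff _ _).mpr
          (fun x hx => hb x ((PySem.Set.mem_ofList _ _).mp hx))
      simp only [pvBoolSets, List.any_cons, List.any_nil, Bool.or_eq_true, Bool.or_false]
      rcases pvGroup_total v with hv | hv | hv | hv | hv | hv
      · exfalso
        have hm : pvGroup.getD v (-1) ∈ (v :: rest).map (fun v => pvGroup.getD v (-1)) :=
          List.mem_map_of_mem List.mem_cons_self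
        rw [hv] at hm
        exact hnone hm
      · refine Or.inl (hsubset _ (fun x hx => ?_))
        have : pvGroup.getD x (-1) = 0 := by rw [hv0 x hx, hv]
        have := (pvGroup_eq_zero x).mp this
        simpa [PySem.Set.ofList] using this
      · refine Or.inr (Or.inl (hsubset _ (fun x hx => ?_)))
        have : pvGroup.getD x (-1) = 1 := by rw [hv0 x hx, hv]
        have := (pvGroup_eq_one x).mp this
        simpa [PySem.Set.ofList] using this
      · refine Or.inr (Or.inr (Or.inl (hsubset _ (fun x hx => ?_))))
        have : pvGroup.getD x (-1) = 2 := by rw [hv0 x hx, hv]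
        have := (pvGroup_eq_two x).mp this
        simpa [PySem.Set.ofList] using this
      · refine Or.inr (Or.inr (Or.inr (Or.inl (hsubset _ (fun x hx => ?_)))))
        have : pvGroup.getD x (-1) = 3 := by rw [hv0 x hx, hv]
        have := (pvGroup_eq_three x).mp this
        simpa [PySem.Set.ofList] using this
      · refine Or.inr (Or.inr (Or.inr (Or.inr (hsubset _ (fun x hx => ?_)))))
        have : pvGroup.getD x (-1) = 4 := by rw [hv0 x hx, hv]
        have := (pvGroup_eq_four x).mp this
        simpa [PySem.Set.ofList] using this

-- ===== VERDICT (by name: the statement is the Claim_ definition above) =====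
theorem is_boolean_column_spec : Claim_equal_is_boolean_column := by
  intro col _hdom
  show is_boolean_column col = is_boolean_column_alt col
  simp only [is_boolean_column, is_boolean_column_alt]
  have h := pvCore (((PySem.Dict.mk col).getD "sample_values" []).map (fun v => PySem.Str.lower v))
  rw [List.map_map] at h
  simpa [Function.comp] using h
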